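-- pv_equiv track=rewrite | github.com/coreteamowner-png/sms-allocator-heroku | app.py | get_col_indices_from_headers
-- ===== SOURCE A (Python) =====
-- def get_col_indices_from_headers(headers):
--     col_msg = col_client = col_status = None
--     for i, h in enumerate(headers):
--         hh = (h or "").upper()
--         if "MESSAGE" in hh and col_msg is None:
--             col_msg = i
--         if "CLIENT" in hh and col_client is None:
--             col_client = i
--         if "STATUS" in hh and col_status is None:
--             col_status = i
--     return col_msg, col_client, col_status
-- ===== SOURCE B (Python) =====
-- def get_col_indices_from_headers(headers):
--     ups = [(h or "").upper() for h in headers]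
--
--     def first_match(kw):
--         return next((i for i, hh in enumerate(ups) if kw in hh), None)
--
--     return first_match("MESSAGE"), first_match("CLIENT"), first_match("STATUS")
-- ===== Notes on version B (the rewrite author's own statement) =====
-- stated objective: simpler
-- what changed: Replaces the single fused loop with three explicit None-slots by one uppercasing pass plus three independent first-match scans via a shared helper.
import Mathlib
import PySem

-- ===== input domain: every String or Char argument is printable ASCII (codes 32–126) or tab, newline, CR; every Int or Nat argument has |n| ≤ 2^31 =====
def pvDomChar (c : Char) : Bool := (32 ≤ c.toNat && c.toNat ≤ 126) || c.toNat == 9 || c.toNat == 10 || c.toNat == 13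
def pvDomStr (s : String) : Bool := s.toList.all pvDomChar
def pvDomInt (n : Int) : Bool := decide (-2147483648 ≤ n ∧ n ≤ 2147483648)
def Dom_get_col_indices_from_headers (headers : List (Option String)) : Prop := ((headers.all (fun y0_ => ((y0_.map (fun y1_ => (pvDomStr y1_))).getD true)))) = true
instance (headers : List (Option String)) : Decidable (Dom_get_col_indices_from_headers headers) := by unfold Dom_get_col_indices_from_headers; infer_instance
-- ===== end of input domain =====

-- B replaces A's single fused loop (three mutable None-slots) by one uppercasing pass plus three independent first-match scans (objective: simpler; same cost).


-- ===== PORT A =====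
-- Fused single pass: for each (i, h) update each still-None slot when the keyword occurs.
def get_col_indices_from_headers (headers : List (Option String)) : Option Int × Option Int × Option Int :=
  (PySem.List.enumerate headers 0).foldl
    (fun (s : Option Int × Option Int × Option Int) p =>
      let hh := PySem.Str.upper (p.2.getD "")
      let cm := if PySem.Str.isIn "MESSAGE" hh && s.1.isNone then some p.1 else s.1
      let cc := if PySem.Str.isIn "CLIENT" hh && s.2.1.isNone then some p.1 else s.2.1
      let cs := if PySem.Str.isIn "STATUS" hh && s.2.2.isNone then some p.1 else s.2.2
      (cm, cc, cs))
    (none, none, none)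

-- ===== PORT B =====
-- B: uppercase once, then three independent first-match scans.
def pvFirstMatch (kw : String) : List String → Int → Option Int
  | [], _ => none
  | hh :: rest, i => if PySem.Str.isIn kw hh then some i else pvFirstMatch kw rest (i + 1)

def get_col_indices_from_headers_alt (headers : List (Option String)) : Option Int × Option Int × Option Int :=
  let ups := headers.map (fun h => PySem.Str.upper (h.getD ""))
  (pvFirstMatch "MESSAGE" ups 0, pvFirstMatch "CLIENT" ups 0, pvFirstMatch "STATUS" ups 0)

-- ===== PRECONDITION & SPEC =====
def Spec_get_col_indices_from_headers (headers : List (Option String)) (out : Option Int × Option Int × Option Int) : Prop := out = get_col_indices_from_headers_alt headers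
instance (headers : List (Option String)) (out : Option Int × Option Int × Option Int) : Decidable (Spec_get_col_indices_from_headers headers out) := by unfold Spec_get_col_indices_from_headers; infer_instance

-- ===== CLAIM (what is proved, stated in full; the proofs are below) =====
def Claim_equal_get_col_indices_from_headers : Prop := ∀ (headers : List (Option String)), Dom_get_col_indices_from_headers headers → Spec_get_col_indices_from_headers headers (get_col_indices_from_headers headers)

-- ===== LEMMAS AND PROOFS =====
-- One slot's behaviour: the fused fold starting from state (a,b,c) fills each slot
-- with its old value if set, otherwise with the first match at the right offset.
theorem pv_fold_inv (l : List (Option String)) : ∀ (i : Int) (a b c : Option Int),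
    (PySem.List.enumerate l i).foldl
      (fun (s : Option Int × Option Int × Option Int) p =>
        let hh := PySem.Str.upper (p.2.getD "")
        let cm := if PySem.Str.isIn "MESSAGE" hh && s.1.isNone then some p.1 else s.1
        let cc := if PySem.Str.isIn "CLIENT" hh && s.2.1.isNone then some p.1 else s.2.1
        let cs := if PySem.Str.isIn "STATUS" hh && s.2.2.isNone then some p.1 else s.2.2
        (cm, cc, cs))
      (a, b, c)
    = (a.or (pvFirstMatch "MESSAGE" (l.map (fun h => PySem.Str.upper (h.getD ""))) i),
       b.or (pvFirstMatch "CLIENT" (l.map (fun h => PySem.Str.upper (h.getD ""))) i),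
       c.or (pvFirstMatch "STATUS" (l.map (fun h => PySem.Str.upper (h.getD ""))) i)) := by
  induction l with
  | nil => intro i a b c; simp [PySem.List.enumerate, pvFirstMatch]
  | cons h t ih =>
    intro i a b c
    rw [PySem.List.enumerate_cons]
    simp only [List.foldl_cons, List.map_cons]
    rw [ih]
    congr 1
    · cases a <;> simp [pvFirstMatch] <;> split <;> simp
    congr 1
    · cases b <;> simp [pvFirstMatch] <;> split <;> simp
    · cases c <;> simp [pvFirstMatch] <;> split <;> simp

-- ===== VERDICT (by name: the statement is the Claim_ definition above) =====
theorem get_col_indices_from_headers_spec : Claim_equal_get_col_indices_from_headers := by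
  intro headers _
  show _ = _
  unfold get_col_indices_from_headers get_col_indices_from_headers_alt
  rw [pv_fold_inv]
  simp
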